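-- pv_equiv track=rewrite | github.com/katanukisatoshi/cells-detector | apps/_old/line_filter.py | remove_lines_with_large_gap_left
-- ===== SOURCE A (Python) =====
-- def remove_lines_with_large_gap_left(vertical_lines, gap_threshold=30):
--     left_lines = vertical_lines[:6]
--     filtered_left_lines = []
--     for i in range(len(left_lines) - 1):
--         if (left_lines[i+1] - left_lines[i]) <= gap_threshold:
--             filtered_left_lines.append(left_lines[i])
--             filtered_left_lines.append(left_lines[i+1])
--     filtered_left_lines = list(set(filtered_left_lines))  # Remove duplicates
--     filtered_left_lines.sort()  # Ensure the lines are sorted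
--     return filtered_left_lines
-- ===== SOURCE B (Python) =====
-- def remove_lines_with_large_gap_left(vertical_lines, gap_threshold=30):
--     # Group the first six lines into maximal runs of consecutive close lines,
--     # then keep every run that contains at least two lines.
--     runs = []
--     for x in vertical_lines[:6]:
--         if runs and x - runs[-1][-1] <= gap_threshold:
--             runs[-1].append(x)
--         else:
--             runs.append([x])
--     kept = set()
--     for run in runs:
--         if len(run) >= 2:
--             kept.update(run)
--     return sorted(kept)
-- ===== Notes on version B (the rewrite author's own statement) =====
-- stated objective: alternative
-- what changed: Replaces A's per-pair scan that appends both endpoints of every close adjacent pair followed by list(set(..)) and an in-place sort with a run-segmentation algorithm: group the six-line prefix into maximal runs of consecutively close lines, then keep exactly the runs containing at least two lines.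
import Mathlib
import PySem

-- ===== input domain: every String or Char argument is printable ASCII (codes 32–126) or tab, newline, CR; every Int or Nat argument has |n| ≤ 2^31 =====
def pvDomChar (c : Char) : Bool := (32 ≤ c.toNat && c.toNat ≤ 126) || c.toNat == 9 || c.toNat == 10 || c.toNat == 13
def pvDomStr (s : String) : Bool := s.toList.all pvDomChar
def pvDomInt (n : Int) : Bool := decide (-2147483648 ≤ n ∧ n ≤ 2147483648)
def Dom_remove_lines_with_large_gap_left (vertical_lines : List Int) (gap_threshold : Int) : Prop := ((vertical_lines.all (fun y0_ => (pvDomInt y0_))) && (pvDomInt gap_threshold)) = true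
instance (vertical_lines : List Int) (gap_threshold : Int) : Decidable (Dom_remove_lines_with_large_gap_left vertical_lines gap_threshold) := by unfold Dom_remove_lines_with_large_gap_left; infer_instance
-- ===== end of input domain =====

-- B replaces A's per-pair endpoint-collecting scan by a run-segmentation algorithm:
-- group the six-line prefix into maximal runs of consecutively close lines, keep
-- every run of length ≥ 2 (objective: alternative; same cost on these tiny inputs).

-- ===== PORT A =====
def remove_lines_with_large_gap_left (vertical_lines : List Int) (gap_threshold : Int) : List Int :=
  let left_lines := PySem.List.slice vertical_lines none (some 6)
  let filtered_left_lines : List Int :=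
    (PySem.List.pyRange 0 ((left_lines.length : Int) - 1) 1).foldl
      (fun acc i =>
        if PySem.List.pyGetD left_lines (i + 1) 0 - PySem.List.pyGetD left_lines i 0 ≤ gap_threshold then
          acc ++ [PySem.List.pyGetD left_lines i 0] ++ [PySem.List.pyGetD left_lines (i + 1) 0]
        else acc) []
  PySem.List.sorted (PySem.Set.ofList filtered_left_lines) (fun x => x) false

-- ===== PORT B =====
-- one step of B's grouping loop: append x to the last run if it is close to that
-- run's last element, else start a new run.  runs[-1][-1] is ported as
-- `r.getLastD 0`: exact because every run B builds is nonempty.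
def pvStepRun (gap_threshold : Int) (runs : List (List Int)) (x : Int) : List (List Int) :=
  match runs.getLast? with
  | some r =>
      if x - r.getLastD 0 ≤ gap_threshold then runs.dropLast ++ [r ++ [x]]
      else runs ++ [[x]]
  | none => [[x]]

def remove_lines_with_large_gap_left_alt (vertical_lines : List Int) (gap_threshold : Int) : List Int :=
  let left := PySem.List.slice vertical_lines none (some 6)
  let runs := left.foldl (pvStepRun gap_threshold) []
  let kept :=
    runs.foldl (fun s run => if 2 ≤ run.length then PySem.Set.update s run else s)
      PySem.Set.empty
  PySem.List.sorted kept (fun x => x) false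

-- ===== PRECONDITION & SPEC =====
def Spec_remove_lines_with_large_gap_left (vertical_lines : List Int) (gap_threshold : Int) (out : List Int) : Prop := out = remove_lines_with_large_gap_left_alt vertical_lines gap_threshold
instance (vertical_lines : List Int) (gap_threshold : Int) (out : List Int) : Decidable (Spec_remove_lines_with_large_gap_left vertical_lines gap_threshold out) := by unfold Spec_remove_lines_with_large_gap_left; infer_instance

-- ===== CLAIM (what is proved, stated in full; the proofs are below) =====
def Claim_equal_remove_lines_with_large_gap_left : Prop := ∀ (vertical_lines : List Int) (gap_threshold : Int), Dom_remove_lines_with_large_gap_left vertical_lines gap_threshold → Spec_remove_lines_with_large_gap_left vertical_lines gap_threshold (remove_lines_with_large_gap_left vertical_lines gap_threshold)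

-- ===== LEMMAS AND PROOFS =====

-- "x is an endpoint of some close adjacent pair of L" — the common membership
-- characterisation both pipelines are reduced to.
def pvPairMem (L : List Int) (g x : Int) : Prop :=
  ∃ i : Int, 0 ≤ i ∧ i < (L.length : Int) - 1 ∧
    PySem.List.pyGetD L (i + 1) 0 - PySem.List.pyGetD L i 0 ≤ g ∧
    (x = PySem.List.pyGetD L i 0 ∨ x = PySem.List.pyGetD L (i + 1) 0)

-- membership in B's kept-set fold
lemma mem_kept_foldl (x : Int) :
    ∀ (R : List (List Int)) (s : List Int),
      x ∈ R.foldl (fun s run => if 2 ≤ run.length then PySem.Set.update s run else s) s ↔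
        x ∈ s ∨ ∃ r ∈ R, 2 ≤ r.length ∧ x ∈ r := by
  intro R
  induction R with
  | nil => simp
  | cons a R ih =>
    intro s
    simp only [List.foldl_cons, ih, List.mem_cons]
    by_cases h : 2 ≤ a.length
    · simp only [if_pos h, PySem.Set.mem_update]
      constructor
      · rintro (⟨hx | hx⟩ | ⟨r, hr, h2, hx⟩)
        · exact Or.inl hx
        · exact Or.inr ⟨a, Or.inl rfl, h, hx⟩
        · exact Or.inr ⟨r, Or.inr hr, h2, hx⟩
      · rintro (hx | ⟨r, rfl | hr, h2, hx⟩)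
        · exact Or.inl (Or.inl hx)
        · exact Or.inl (Or.inr hx)
        · exact Or.inr ⟨r, hr, h2, hx⟩
    · simp only [if_neg h]
      constructor
      · rintro (hx | ⟨r, hr, h2, hx⟩)
        · exact Or.inl hx
        · exact Or.inr ⟨r, Or.inr hr, h2, hx⟩
      · rintro (hx | ⟨r, rfl | hr, h2, hx⟩)
        · exact Or.inl hx
        · exact absurd h2 h
        · exact Or.inr ⟨r, hr, h2, hx⟩

-- B's kept-set fold keeps the accumulator duplicate-free
lemma nodup_kept_foldl :
    ∀ (R : List (List Int)) (s : List Int), s.Nodup →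
      (R.foldl (fun s run => if 2 ≤ run.length then PySem.Set.update s run else s) s).Nodup := by
  intro R
  induction R with
  | nil => intro s hs; simpa using hs
  | cons a R ih =>
    intro s hs
    simp only [List.foldl_cons]
    by_cases h : 2 ≤ a.length
    · rw [if_pos h]; exact ih _ (PySem.Set.nodup_update _ _ hs)
    · rw [if_neg h]; exact ih _ hs

-- structure of B's run list: it ends in a nonempty run whose last element is L's last
lemma runs_inv (g : Int) :
    ∀ L : List Int, L ≠ [] →
      ∃ R r, List.foldl (pvStepRun g) [] L = R ++ [r] ∧ r ≠ [] ∧ r.getLast? = L.getLast? := by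
  intro L
  induction L using List.reverseRecOn with
  | nil => intro h; exact absurd rfl h
  | append_singleton L y ih =>
    intro _
    rw [List.foldl_append, List.foldl_cons, List.foldl_nil]
    by_cases hL : L = []
    · subst hL
      exact ⟨[], [y], by simp [pvStepRun], by simp, by simp⟩
    · obtain ⟨R, r, hR, hr, hlast⟩ := ih hL
      rw [hR]
      simp only [pvStepRun, List.getLast?_concat]
      by_cases hc : y - r.getLastD 0 ≤ g
      · rw [if_pos hc, List.dropLast_concat]
        exact ⟨R, r ++ [y], rfl, by simp, by simp⟩
      · rw [if_neg hc]
        exact ⟨R ++ [r], [y], rfl, by simp, by simp⟩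

-- indexing a snoc below / at the seam
lemma pyGetD_append_lt (L : List Int) (y i : Int) (h0 : 0 ≤ i) (h : i < (L.length : Int)) :
    PySem.List.pyGetD (L ++ [y]) i 0 = PySem.List.pyGetD L i 0 := by
  rw [PySem.List.pyGetD_eq_getElem (L ++ [y]) 0 h0 (by simp only [List.length_append, List.length_cons, List.length_nil]; push_cast; omega),
    PySem.List.pyGetD_eq_getElem L 0 h0 h,
    List.getElem_append_left]

lemma pyGetD_append_len (L : List Int) (y : Int) :
    PySem.List.pyGetD (L ++ [y]) (L.length : Int) 0 = y := by
  rw [PySem.List.pyGetD_eq_getElem (L ++ [y]) 0 (by positivity) (by simp only [List.length_append, List.length_cons, List.length_nil]; push_cast; omega)]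
  simp

-- how the pair characterisation grows under snoc
lemma pairMem_snoc (g y x : Int) (L : List Int) (hL : L ≠ []) :
    pvPairMem (L ++ [y]) g x ↔
      pvPairMem L g x ∨ (y - L.getLast hL ≤ g ∧ (x = L.getLast hL ∨ x = y)) := by
  have hn : 1 ≤ (L.length : Int) := by
    have := List.length_pos_iff.mpr hL; omega
  have hlast : L.getLast hL = PySem.List.pyGetD L ((L.length : Int) - 1) 0 := by
    rw [PySem.List.pyGetD_eq_getElem L 0 (by omega) (by omega)]
    rw [List.getLast_eq_getElem]
    congr 1
    omega
  constructor
  · rintro ⟨i, h0, hi, hg, hx⟩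
    simp only [List.length_append, List.length_cons, List.length_nil] at hi
    push_cast at hi
    by_cases hseam : i < (L.length : Int) - 1
    · left
      refine ⟨i, h0, hseam, ?_, ?_⟩
      · rwa [pyGetD_append_lt L y i h0 (by omega), pyGetD_append_lt L y (i+1) (by omega) (by omega)] at hg
      · rwa [pyGetD_append_lt L y i h0 (by omega), pyGetD_append_lt L y (i+1) (by omega) (by omega)] at hx
    · right
      have hieq : i = (L.length : Int) - 1 := by omega
      subst hieq
      have h1 : (L.length : Int) - 1 + 1 = (L.length : Int) := by omega
      rw [h1, pyGetD_append_len, pyGetD_append_lt L y _ (by omega) (by omega)] at hg hx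
      rw [hlast]
      exact ⟨hg, hx⟩
  · rintro (⟨i, h0, hi, hg, hx⟩ | ⟨hg, hx⟩)
    · refine ⟨i, h0, by simp only [List.length_append, List.length_cons, List.length_nil]; push_cast; omega, ?_, ?_⟩
      · rwa [pyGetD_append_lt L y i h0 (by omega), pyGetD_append_lt L y (i+1) (by omega) (by omega)]
      · rwa [pyGetD_append_lt L y i h0 (by omega), pyGetD_append_lt L y (i+1) (by omega) (by omega)]
    · refine ⟨(L.length : Int) - 1, by omega, by simp only [List.length_append, List.length_cons, List.length_nil]; push_cast; omega, ?_, ?_⟩ <;>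
      · have h1 : (L.length : Int) - 1 + 1 = (L.length : Int) := by omega
        rw [h1, pyGetD_append_len, pyGetD_append_lt L y _ (by omega) (by omega), ← hlast]
        assumption
  
-- ∃-membership over a run list with its last run split off
lemma hsplit_kept (x : Int) (R : List (List Int)) (c : List Int) :
    (∃ r' ∈ R ++ [c], 2 ≤ r'.length ∧ x ∈ r') ↔
      (∃ r' ∈ R, 2 ≤ r'.length ∧ x ∈ r') ∨ (2 ≤ c.length ∧ x ∈ c) := by
  constructor
  · rintro ⟨r', hr', h2, hx⟩
    rcases List.mem_append.mp hr' with h | h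
    · exact Or.inl ⟨r', h, h2, hx⟩
    · simp only [List.mem_singleton] at h; subst h; exact Or.inr ⟨h2, hx⟩
  · rintro (⟨r', h, h2, hx⟩ | ⟨h2, hx⟩)
    · exact ⟨r', List.mem_append_left _ h, h2, hx⟩
    · exact ⟨c, List.mem_append_right _ (by simp), h2, hx⟩

-- core: membership in B's kept set is exactly the close-pair-endpoint condition
lemma kept_runs_char (g : Int) :
    ∀ (L : List Int) (x : Int),
      (x ∈ (List.foldl (pvStepRun g) [] L).foldl
        (fun s run => if 2 ≤ run.length then PySem.Set.update s run else s) ([] : List Int))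
      ↔ pvPairMem L g x := by
  intro L
  induction L using List.reverseRecOn with
  | nil =>
    intro x
    simp only [List.foldl_nil]
    constructor
    · intro h; exact absurd h (by simp)
    · rintro ⟨i, h0, hi, -⟩; simp at hi; omega
  | append_singleton L y ih =>
    intro x
    rw [List.foldl_append, List.foldl_cons, List.foldl_nil]
    by_cases hL : L = []
    · subst hL
      simp only [List.foldl_nil]
      constructor
      · intro h
        simp [pvStepRun] at h
      · rintro ⟨i, h0, hi, -⟩; simp at hi; omega
    · obtain ⟨R, r, hR, hr, hlast⟩ := runs_inv g L hL
      have hlastr : r.getLast? = some (L.getLast hL) := by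
        rw [hlast, List.getLast?_eq_some_getLast hL]
      have hgetD : r.getLastD 0 = L.getLast hL := by
        rw [List.getLastD_eq_getLast?, hlastr]; rfl
      have hmemr : L.getLast hL ∈ r := List.mem_of_getLast? hlastr
      have ihx := ih x
      rw [hR, mem_kept_foldl] at ihx
      rw [hR]
      simp only [pvStepRun, List.getLast?_concat, hgetD]
      rw [pairMem_snoc g y x L hL]
      by_cases hc : y - L.getLast hL ≤ g
      · rw [if_pos hc, List.dropLast_concat, mem_kept_foldl]
        simp only [List.not_mem_nil, false_or] at ihx ⊢
        rw [hsplit_kept x R r] at ihx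
        rw [hsplit_kept x R (r ++ [y]), ← ihx]
        have hlen2 : 2 ≤ (r ++ [y]).length := by
          have := List.length_pos_iff.mpr hr
          simp only [List.length_append, List.length_cons, List.length_nil]
          omega
        constructor
        · rintro (h | ⟨-, hx⟩)
          · exact Or.inl (Or.inl h)
          · rcases List.mem_append.mp hx with hx | hx
            · by_cases h2 : 2 ≤ r.length
              · exact Or.inl (Or.inr ⟨h2, hx⟩)
              · -- r is a singleton, so x is L's last element
                have hre : r = [L.getLast hL] := by
                  rcases r with - | ⟨a, t⟩
                  · exact absurd rfl hr
                  · rcases t with - | ⟨b, t⟩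
                    · simp only [List.getLast?_singleton, Option.some.injEq] at hlastr
                      rw [hlastr]
                    · simp at h2
                rw [hre] at hx
                simp only [List.mem_singleton] at hx
                exact Or.inr ⟨hc, Or.inl hx⟩
            · simp only [List.mem_singleton] at hx
              exact Or.inr ⟨hc, Or.inr hx⟩
        · rintro ((h | ⟨h2, hx⟩) | ⟨-, hx | hx⟩)
          · exact Or.inl h
          · exact Or.inr ⟨hlen2, List.mem_append_left _ hx⟩
          · exact Or.inr ⟨hlen2, List.mem_append_left _ (hx ▸ hmemr)⟩
          · exact Or.inr ⟨hlen2, List.mem_append_right _ (by simp [hx])⟩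
      · rw [if_neg hc, mem_kept_foldl]
        simp only [List.not_mem_nil, false_or] at ihx ⊢
        rw [hsplit_kept x (R ++ [r]) [y], ← ihx]
        constructor
        · rintro (h | ⟨h2, -⟩)
          · exact Or.inl h
          · simp at h2
        · rintro (h | ⟨hg, -⟩)
          · exact Or.inl h
          · exact absurd hg hc

-- membership in an if-then-pair-else-nil literal
lemma mem_ite_pair (c : Prop) [Decidable c] (a b x : Int) :
    x ∈ (if c then [a, b] else ([] : List Int)) ↔ c ∧ (x = a ∨ x = b) := by
  split_ifs with h <;> simp [h]

-- ===== VERDICT (by name: the statement is the Claim_ definition above) =====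
theorem remove_lines_with_large_gap_left_spec : Claim_equal_remove_lines_with_large_gap_left := by
  intro vertical_lines gap_threshold _
  unfold Spec_remove_lines_with_large_gap_left
  unfold remove_lines_with_large_gap_left remove_lines_with_large_gap_left_alt
  dsimp only
  set L := PySem.List.slice vertical_lines none (some 6) with hLdef
  -- A's appending loop is a flatMap of per-pair two-element blocks
  have hbody : (fun (acc : List Int) (i : Int) =>
      if PySem.List.pyGetD L (i + 1) 0 - PySem.List.pyGetD L i 0 ≤ gap_threshold then
        acc ++ [PySem.List.pyGetD L i 0] ++ [PySem.List.pyGetD L (i + 1) 0]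
      else acc)
      = (fun acc i => acc ++
          (if PySem.List.pyGetD L (i + 1) 0 - PySem.List.pyGetD L i 0 ≤ gap_threshold then
            [PySem.List.pyGetD L i 0, PySem.List.pyGetD L (i + 1) 0] else [])) := by
    funext acc i
    split_ifs <;> simp
  rw [hbody, PySem.List.foldl_append_eq_flatMap, List.nil_append]
  rw [PySem.List.sorted_id_eq_sorted_id_iff_perm]
  apply (List.perm_ext_iff_of_nodup (PySem.Set.nodup_ofList _)
    (nodup_kept_foldl _ _ List.nodup_nil)).mpr
  intro x
  rw [PySem.Set.mem_ofList, List.mem_flatMap, kept_runs_char]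
  constructor
  · rintro ⟨i, hi, hx⟩
    rw [PySem.List.mem_pyRange_one] at hi
    rw [mem_ite_pair] at hx
    exact ⟨i, hi.1, hi.2, hx.1, hx.2⟩
  · rintro ⟨i, h0, hi, hg, hx⟩
    exact ⟨i, PySem.List.mem_pyRange_one.mpr ⟨h0, hi⟩, (mem_ite_pair _ _ _ _).mpr ⟨hg, hx⟩⟩
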